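-- pv_equiv track=rewrite | github.com/AxelKrantz/AoC | solutions/y2016/day_11.py | is_state_safe
-- ===== SOURCE A (Python) =====
-- import collections
-- from typing import Deque, Dict, Iterable, Iterator, List, Sequence, Set, Tuple
--
-- Item = Tuple[int, int]  # (generator_floor, microchip_floor)
--
-- def is_state_safe(items: Sequence[Item]) -> bool:
--     generators_by_floor: Dict[int, Set[int]] = collections.defaultdict(set)
--     chips_by_floor: Dict[int, Set[int]] = collections.defaultdict(set)
--
--     for index, (gen_floor, chip_floor) in enumerate(items):
--         generators_by_floor[gen_floor].add(index)
--         chips_by_floor[chip_floor].add(index)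
--
--     for floor, chips in chips_by_floor.items():
--         gens = generators_by_floor.get(floor)
--         if not gens:
--             continue
--         for chip_index in chips:
--             gen_floor, _ = items[chip_index]
--             if gen_floor != floor:
--                 return False
--     return True
-- ===== SOURCE B (Python) =====
-- def is_state_safe(items):
--     floors_with_gen = {gen_floor for gen_floor, _ in items}
--     for gen_floor, chip_floor in items:
--         if chip_floor != gen_floor and chip_floor in floors_with_gen:
--             return False
--     return True
-- ===== Notes on version B (the rewrite author's own statement) =====
-- stated objective: simpler
-- what changed: Replaces the two index-keyed defaultdict-of-set groupings and the per-floor nested scan with one precomputed set of generator floors and a single flat pass over the items.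
import Mathlib
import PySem

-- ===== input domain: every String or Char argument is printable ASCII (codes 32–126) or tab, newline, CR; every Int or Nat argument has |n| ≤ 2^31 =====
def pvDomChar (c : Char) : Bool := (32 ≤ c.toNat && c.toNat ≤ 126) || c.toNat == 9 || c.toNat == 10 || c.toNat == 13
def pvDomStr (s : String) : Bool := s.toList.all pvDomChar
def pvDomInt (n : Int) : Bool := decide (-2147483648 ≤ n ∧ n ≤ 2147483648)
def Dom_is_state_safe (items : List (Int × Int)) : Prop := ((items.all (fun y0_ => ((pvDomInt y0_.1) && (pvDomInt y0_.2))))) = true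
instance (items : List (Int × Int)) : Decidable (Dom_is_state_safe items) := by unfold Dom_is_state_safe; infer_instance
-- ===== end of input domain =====

-- B replaces A's two index-keyed dict-of-set groupings and nested per-floor scan by one set of
-- generator floors and a single flat pass (objective: simpler).

-- ===== PORT A =====
-- inner 'for chip_index in chips: … if gen_floor != floor: return False' (order-independent: Bool result)
def pvCheckChips (items : List (Int × Int)) (floor : Int) : List Int → Bool
  | [] => true
  | i :: rest =>
    if (PySem.List.pyGetD items i (0, 0)).1 ≠ floor then false
    else pvCheckChips items floor rest

-- outer 'for floor, chips in chips_by_floor.items(): …'; 'if not gens: continue' is the isEmpty test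
def pvCheckFloors (items : List (Int × Int)) (genD : PySem.Dict Int (PySem.Set Int)) :
    List (Int × PySem.Set Int) → Bool
  | [] => true
  | (floor, chips) :: rest =>
    let gens := genD.getD floor PySem.Set.empty
    if gens.isEmpty then pvCheckFloors items genD rest
    else if pvCheckChips items floor chips then pvCheckFloors items genD rest
    else false

def is_state_safe (items : List (Int × Int)) : Bool :=
  let dicts := (PySem.List.enumerate items 0).foldl
    (fun (dc : PySem.Dict Int (PySem.Set Int) × PySem.Dict Int (PySem.Set Int)) p =>
      (dc.1.modify p.2.1 PySem.Set.empty (fun s => PySem.Set.add s p.1),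
       dc.2.modify p.2.2 PySem.Set.empty (fun s => PySem.Set.add s p.1)))
    (PySem.Dict.empty, PySem.Dict.empty)
  pvCheckFloors items dicts.1 dicts.2.items

-- ===== PORT B =====
def pvAltLoop (fw : PySem.Set Int) : List (Int × Int) → Bool
  | [] => true
  | (g, c) :: rest =>
    if c ≠ g ∧ PySem.Set.contains fw c then false else pvAltLoop fw rest

def is_state_safe_alt (items : List (Int × Int)) : Bool :=
  let floors_with_gen : PySem.Set Int := PySem.Set.ofList (items.map (·.1))
  pvAltLoop floors_with_gen items

-- ===== PRECONDITION & SPEC =====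
def Spec_is_state_safe (items : List (Int × Int)) (out : Bool) : Prop := out = is_state_safe_alt items
instance (items : List (Int × Int)) (out : Bool) : Decidable (Spec_is_state_safe items out) := by unfold Spec_is_state_safe; infer_instance

-- ===== CLAIM (what is proved, stated in full; the proofs are below) =====
def Claim_equal_is_state_safe : Prop := ∀ (items : List (Int × Int)), Dom_is_state_safe items → Spec_is_state_safe items (is_state_safe items)

-- ===== LEMMAS AND PROOFS =====

theorem pvCheckChips_eq_all (items : List (Int × Int)) (floor : Int) (l : List Int) :
    pvCheckChips items floor l = l.all (fun i => (PySem.List.pyGetD items i (0, 0)).1 = floor) := by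
  induction l with
  | nil => rfl
  | cons i rest ih =>
    simp only [pvCheckChips, List.all_cons, ih]
    by_cases h : (PySem.List.pyGetD items i (0, 0)).1 = floor <;> simp [h]

theorem pvCheckFloors_eq_all (items : List (Int × Int)) (genD : PySem.Dict Int (PySem.Set Int))
    (l : List (Int × PySem.Set Int)) :
    pvCheckFloors items genD l = l.all (fun fc =>
      if (genD.getD fc.1 PySem.Set.empty).isEmpty then true
      else pvCheckChips items fc.1 fc.2) := by
  induction l with
  | nil => rfl
  | cons fc rest ih =>
    obtain ⟨floor, chips⟩ := fc
    simp only [pvCheckFloors, List.all_cons, ih]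
    by_cases h : (genD.getD floor PySem.Set.empty).isEmpty <;>
      by_cases h2 : pvCheckChips items floor chips <;> simp [h2]

theorem pvAltLoop_eq_all (fw : PySem.Set Int) (l : List (Int × Int)) :
    pvAltLoop fw l = l.all (fun p => !(decide (p.2 ≠ p.1) && PySem.Set.contains fw p.2)) := by
  induction l with
  | nil => rfl
  | cons p rest ih =>
    obtain ⟨g, c⟩ := p
    simp only [pvAltLoop, List.all_cons, ih]
    by_cases h : c ≠ g ∧ PySem.Set.contains fw c
    · simp [h.1]
    · push Not at h
      by_cases hc : c = g <;> simp_all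

-- membership in a value set of the grouping fold
theorem pv_mem_getD_build (key : Int × Int → Int) :
    ∀ (xs : List (Int × Int)) (n : Int) (d : PySem.Dict Int (PySem.Set Int)) (i f : Int),
      i ∈ (List.foldl (fun d (p : Int × (Int × Int)) =>
              d.modify (key p.2) PySem.Set.empty (fun s => PySem.Set.add s p.1))
            d (PySem.List.enumerate xs n)).getD f PySem.Set.empty
      ↔ i ∈ d.getD f PySem.Set.empty ∨ ∃ p ∈ PySem.List.enumerate xs n, key p.2 = f ∧ i = p.1 := by
  intro xs
  induction xs with
  | nil => simp [PySem.List.enumerate_nil]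
  | cons x rest ih =>
    intro n d i f
    rw [PySem.List.enumerate_cons, List.foldl_cons, ih]
    rw [PySem.Dict.getD_modify]
    constructor
    · rintro (h | ⟨p, hp, hk, hi⟩)
      · split_ifs at h with hf
        · rw [PySem.Set.mem_add] at h
          rcases h with h | h
          · exact Or.inl (hf ▸ h)
          · exact Or.inr ⟨(n, x), by simp, hf ▸ rfl, h⟩
        · exact Or.inl h
      · exact Or.inr ⟨p, by simp [hp], hk, hi⟩
    · rintro (h | ⟨p, hp, hk, hi⟩)
      · left; split_ifs with hf
        · rw [PySem.Set.mem_add]; exact Or.inl (hf ▸ h)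
        · exact h
      · rcases List.mem_cons.mp hp with hp | hp
        · left; subst hp
          simp only at hk hi
          rw [if_pos hk.symm, PySem.Set.mem_add]
          exact Or.inr hi
        · exact Or.inr ⟨p, hp, hk, hi⟩

-- every value set of the grouping fold is nonempty
theorem pv_getD_build_ne_nil (key : Int × Int → Int) :
    ∀ (l : List (Int × (Int × Int))) (d : PySem.Dict Int (PySem.Set Int)) (f : Int),
      (∀ g, d.contains g = true → d.getD g PySem.Set.empty ≠ []) →
      (List.foldl (fun d (p : Int × (Int × Int)) =>
          d.modify (key p.2) PySem.Set.empty (fun s => PySem.Set.add s p.1)) d l).contains f = true →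
      (List.foldl (fun d (p : Int × (Int × Int)) =>
          d.modify (key p.2) PySem.Set.empty (fun s => PySem.Set.add s p.1)) d l).getD f PySem.Set.empty ≠ [] := by
  intro l
  induction l with
  | nil => intro d f hinv hc; exact hinv f hc
  | cons p rest ih =>
    intro d f hinv hc
    rw [List.foldl_cons] at hc ⊢
    refine ih _ f ?_ hc
    intro g hg
    rw [PySem.Dict.getD_modify]
    split_ifs with hgk
    · simp [PySem.Set.add_eq_ite]
      split_ifs with _h
      · intro hnil
        rw [hnil] at _h; simp at _h
      · simp
    · rw [PySem.Dict.contains_modify] at hg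
      have : d.contains g = true := by
        rcases Bool.or_eq_true_iff.mp hg with h | h
        · exact absurd (by exact_mod_cast h) (by simpa using hgk)
        · exact h
      exact hinv g this

theorem pv_bool_eq_of_iff {a b : Bool} (h : a = true ↔ b = true) : a = b := by
  cases a <;> cases b <;> simp_all

theorem pv_map_key (items : List (Int × Int)) (g : (Int × Int) → Int) :
    (PySem.List.enumerate items 0).map (fun p => g p.2) = items.map g := by
  conv_rhs => rw [← PySem.List.map_snd_enumerate items 0]
  rw [List.map_map]
  rfl

theorem pv_main (items : List (Int × Int)) : is_state_safe items = is_state_safe_alt items := by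
  apply pv_bool_eq_of_iff
  simp only [is_state_safe, is_state_safe_alt]
  have hsplit := PySem.List.foldl_prod_mk
    (fun (d : PySem.Dict Int (PySem.Set Int)) (p : Int × (Int × Int)) =>
      d.modify p.2.1 PySem.Set.empty (fun s => PySem.Set.add s p.1))
    (fun (d : PySem.Dict Int (PySem.Set Int)) (p : Int × (Int × Int)) =>
      d.modify p.2.2 PySem.Set.empty (fun s => PySem.Set.add s p.1))
    (PySem.List.enumerate items 0) PySem.Dict.empty PySem.Dict.empty
  rw [hsplit]
  set E := PySem.List.enumerate items 0 with hE
  set genD := List.foldl (fun (d : PySem.Dict Int (PySem.Set Int)) (p : Int × (Int × Int)) =>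
      d.modify p.2.1 PySem.Set.empty (fun s => PySem.Set.add s p.1)) PySem.Dict.empty E with hgen
  set chipD := List.foldl (fun (d : PySem.Dict Int (PySem.Set Int)) (p : Int × (Int × Int)) =>
      d.modify p.2.2 PySem.Set.empty (fun s => PySem.Set.add s p.1)) PySem.Dict.empty E with hchip
  -- keys of the two dicts
  have hkeysGen : genD.keys = PySem.Set.ofList (items.map (·.1)) := by
    have h1 : genD.keys = PySem.Set.update (PySem.Dict.empty : PySem.Dict Int (PySem.Set Int)).keys
        (E.map (fun p => p.2.1)) :=
      PySem.Dict.keys_foldl_modify_key E (fun p => p.2.1) PySem.Set.empty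
        (fun _ p s => PySem.Set.add s p.1) PySem.Dict.empty
    rw [h1, hE, pv_map_key items (·.1)]
    simp [PySem.Dict.keys_empty, PySem.Set.update_nil_left]
  have hkeysChip : chipD.keys = PySem.Set.ofList (items.map (·.2)) := by
    have h1 : chipD.keys = PySem.Set.update (PySem.Dict.empty : PySem.Dict Int (PySem.Set Int)).keys
        (E.map (fun p => p.2.2)) :=
      PySem.Dict.keys_foldl_modify_key E (fun p => p.2.2) PySem.Set.empty
        (fun _ p s => PySem.Set.add s p.1) PySem.Dict.empty
    rw [h1, hE, pv_map_key items (·.2)]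
    simp [PySem.Dict.keys_empty, PySem.Set.update_nil_left]
  have hnodup : chipD.keys.Nodup :=
    PySem.Dict.nodup_keys_foldl_modify_key E (fun p => p.2.2) PySem.Set.empty
      (fun _ p s => PySem.Set.add s p.1) PySem.Dict.empty (by simp [PySem.Dict.keys_empty])
  have hcg : ∀ f, genD.contains f = true ↔ f ∈ items.map (·.1) := by
    intro f
    rw [PySem.Dict.contains_iff_mem_keys, hkeysGen, PySem.Set.mem_ofList]
  have hne : ∀ f, genD.contains f = true → genD.getD f PySem.Set.empty ≠ [] := by
    intro f hc
    exact pv_getD_build_ne_nil (fun q => q.1) E PySem.Dict.empty f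
      (by intro g hg; simp [PySem.Dict.contains_empty] at hg) hc
  have hgEmpty : ∀ f, (genD.getD f PySem.Set.empty).isEmpty = true ↔ f ∉ items.map (·.1) := by
    intro f
    constructor
    · intro h hf
      exact hne f ((hcg f).mpr hf) (List.isEmpty_iff.mp h)
    · intro hf
      have hc : genD.contains f = false := by
        cases h : genD.contains f
        · rfl
        · exact absurd ((hcg f).mp h) hf
      rw [PySem.Dict.getD_of_not_contains genD PySem.Set.empty hc]
      rfl
  have hmem : ∀ i f, i ∈ chipD.getD f PySem.Set.empty ↔
      ∃ k, ∃ h : k < items.length, (items[k]'h).2 = f ∧ i = (k : Int) := by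
    intro i f
    have h0 : i ∈ chipD.getD f PySem.Set.empty ↔
        i ∈ (PySem.Dict.empty : PySem.Dict Int (PySem.Set Int)).getD f PySem.Set.empty ∨
          ∃ p ∈ E, p.2.2 = f ∧ i = p.1 :=
      pv_mem_getD_build (fun q => q.2) items 0 PySem.Dict.empty i f
    rw [h0, hE]
    simp only [PySem.Dict.getD_empty]
    constructor
    · rintro (h | ⟨p, hp, hkf, hi⟩)
      · simp [PySem.Set.empty] at h
      · obtain ⟨k, hk, rfl⟩ := (PySem.List.mem_enumerate_iff items 0 p).mp hp
        exact ⟨k, hk, hkf, by simpa using hi⟩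
    · rintro ⟨k, hk, hkf, rfl⟩
      refine Or.inr ⟨(0 + (k : Int), items[k]), ?_, ?_, by simp⟩
      · exact (PySem.List.mem_enumerate_iff items 0 _).mpr ⟨k, hk, rfl⟩
      · exact hkf
  -- both sides as ∀-statements
  rw [pvCheckFloors_eq_all, pvAltLoop_eq_all, List.all_eq_true, List.all_eq_true]
  constructor
  · -- A safe → B safe
    intro hA p hp
    by_cases h1 : p.2 = p.1
    · simp [h1]
    by_cases h2 : p.2 ∈ items.map (·.1)
    · exfalso
      obtain ⟨k, hk, hpk⟩ := List.mem_iff_getElem.mp hp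
      have hcf : chipD.contains p.2 = true := by
        rw [PySem.Dict.contains_iff_mem_keys, hkeysChip, PySem.Set.mem_ofList]
        exact List.mem_map.mpr ⟨p, hp, rfl⟩
      have hsome : (chipD.get? p.2).isSome := by
        rw [← PySem.Dict.contains_eq_isSome_get?]; exact hcf
      obtain ⟨v, hv⟩ := Option.isSome_iff_exists.mp hsome
      have hAv := hA (p.2, v) (PySem.Dict.mem_items_of_get?_eq_some chipD hv)
      have hvD : chipD.getD p.2 PySem.Set.empty = v :=
        PySem.Dict.getD_of_get?_eq_some chipD PySem.Set.empty hv
      have hgne : (genD.getD p.2 PySem.Set.empty).isEmpty = false := by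
        cases h : (genD.getD p.2 PySem.Set.empty).isEmpty
        · rfl
        · exact absurd h2 ((hgEmpty p.2).mp h)
      rw [hgne] at hAv
      simp only [Bool.false_eq_true, if_false] at hAv
      rw [pvCheckChips_eq_all, List.all_eq_true] at hAv
      have hkin : (k : Int) ∈ v := by
        rw [← hvD, hmem]
        exact ⟨k, hk, by rw [hpk], rfl⟩
      have := hAv (k : Int) hkin
      rw [PySem.List.pyGetD_natCast] at this
      simp only [decide_eq_true_eq] at this
      rw [List.getD_eq_getElem items (0, 0) hk, hpk] at this
      exact h1 (this ▸ rfl)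
    · have hcfalse : PySem.Set.contains (PySem.Set.ofList (items.map (·.1))) p.2 = false := by
        cases h : PySem.Set.contains (PySem.Set.ofList (items.map (·.1))) p.2
        · rfl
        · exact absurd ((PySem.Set.mem_ofList _ _).mp ((PySem.Set.contains_iff _ _).mp h)) h2
      simp
      exact Or.inr (fun x hx => h2 (List.mem_map.mpr ⟨(p.2, x), hx, rfl⟩))
  · -- B safe → A safe
    intro hB fc hfc
    obtain ⟨f, v⟩ := fc
    cases hge : (genD.getD f PySem.Set.empty).isEmpty
    · simp only [Bool.false_eq_true, if_false]
      have hcont : genD.contains f = true := by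
        cases h : genD.contains f
        · exfalso
          have := PySem.Dict.getD_of_not_contains genD (k := f) PySem.Set.empty h
          rw [this] at hge
          simp [PySem.Set.empty] at hge
        · rfl
      have hfgen : f ∈ items.map (·.1) := (hcg f).mp hcont
      have hvD : chipD.getD f PySem.Set.empty = v :=
        PySem.Dict.getD_of_mem_items chipD hfc hnodup PySem.Set.empty
      rw [pvCheckChips_eq_all, List.all_eq_true]
      intro i hi
      obtain ⟨k, hk, hkf, rfl⟩ := (hmem i f).mp (hvD ▸ hi)
      rw [PySem.List.pyGetD_natCast]
      simp only [decide_eq_true_eq]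
      rw [List.getD_eq_getElem items (0, 0) hk]
      have hBk := hB items[k] (List.getElem_mem hk)
      by_cases heq : items[k].2 = items[k].1
      · rw [← heq, hkf]
      · exfalso
        have hcmem : PySem.Set.contains (PySem.Set.ofList (items.map (·.1))) items[k].2 = true := by
          rw [PySem.Set.contains_iff, PySem.Set.mem_ofList]
          exact hkf ▸ hfgen
        simp [heq] at hBk
        obtain ⟨q, hq, hq1⟩ := List.mem_map.mp hfgen
        exact hBk q.2 (by rw [hkf, ← hq1]; simpa using hq)
    · simp

-- ===== VERDICT (by name: the statement is the Claim_ definition above) =====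
theorem is_state_safe_spec : Claim_equal_is_state_safe := by
  intro items _
  exact pv_main items
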